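-- pv_equiv track=rewrite | github.com/heeji289/elice_study | notCoderJ/dfs_bfs/travel_path.py | solution
-- ===== SOURCE A (Python) =====
-- from collections import defaultdict
-- import heapq
--
-- def solution(tickets):
--     answer = []
--     remain = defaultdict(list)
--     for s, d in tickets:
--         heapq.heappush(remain[s], d)
--
--     st = ["ICN"]
--     while st:
--         start = st[-1]
--         if remain[start]:
--             st.append(heapq.heappop(remain[start]))
--         else:
--             answer.append(st.pop())
--
--     return answer[::-1]
-- ===== SOURCE B (Python) =====
-- def solution(tickets):
--     graph = {}
--     for s, d in tickets:
--         graph.setdefault(s, []).append(d)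
--     for s in graph:
--         graph[s].sort()
--     result = []
--
--     def dfs(node):
--         dests = graph.get(node, [])
--         while dests:
--             dfs(dests.pop(0))
--         result.append(node)
--
--     dfs("ICN")
--     return result[::-1]
-- ===== Notes on version B (the rewrite author's own statement) =====
-- stated objective: idiomatic
-- what changed: A's explicit-stack Hierholzer with per-node heapq heaps is replaced by the standard recursive Hierholzer DFS over adjacency lists built once and sorted once, popping the smallest remaining destination and appending nodes on backtrack.
import Mathlib
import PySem

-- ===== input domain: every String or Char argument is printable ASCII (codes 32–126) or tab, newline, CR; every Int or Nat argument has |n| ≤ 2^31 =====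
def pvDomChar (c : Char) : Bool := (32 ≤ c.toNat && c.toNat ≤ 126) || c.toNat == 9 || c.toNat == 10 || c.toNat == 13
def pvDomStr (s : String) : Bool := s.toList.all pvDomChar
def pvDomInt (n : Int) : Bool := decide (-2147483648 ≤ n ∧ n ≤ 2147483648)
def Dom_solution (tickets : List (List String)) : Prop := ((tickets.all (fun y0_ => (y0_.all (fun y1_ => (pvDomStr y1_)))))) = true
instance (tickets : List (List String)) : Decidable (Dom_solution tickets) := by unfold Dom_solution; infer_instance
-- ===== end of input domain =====

-- B replaces A's explicit stack + per-node heaps by the standard recursive Hierholzer DFS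
-- over adjacency lists built once and sorted once (idiomatic restructuring, same cost class).
-- Both mutate only local state in Python; the equivalence is about the return value.

-- ===== PORT A =====
-- The while loop of A; the stack top st[-1] is the list head (append/pop act on the head).
-- The heapq heap of strings is ported as an ascending sorted list: heappush = ordered insert,
-- heappop = take the head — observationally exact (heappop returns the minimum remaining string,
-- and equal strings are indistinguishable).  Fuel 2*len(tickets)+2 is never exhausted on inputs
-- satisfying Pre_solution (proved below); the fuel-0 branch returns the accumulated answer.
def loopA : Nat → List String → PySem.Dict String (List String) → List String → List String
  | 0, _, _, answer => answer
  | _ + 1, [], _, answer => answer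
  | f + 1, start :: rest, remain, answer =>
    let bucket := remain.getD start []
    if hb : bucket ≠ [] then  -- 'if remain[start]:' — Python truthiness of the heap
      loopA f (bucket.head hb :: start :: rest) (remain.insert start bucket.tail) answer
    else
      loopA f rest remain (answer ++ [start])

-- answer[::-1] is List.reverse (PySem.List.slice?_none_none_neg_one).
def solution (tickets : List (List String)) : List String :=
  let remain : PySem.Dict String (List String) :=
    tickets.foldl (fun dct tk =>
      -- 's, d = tk[0], tk[1]': Python raises ValueError on a non-pair ticket (excluded by Pre_solution)
      if tk.length = 2 then
        dct.modify (tk.getD 0 "") []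
          (fun b => PySem.List.insertBy (fun a b => decide (a < b)) (tk.getD 1 "") b)
      else dct)
      PySem.Dict.empty
  (loopA (2 * tickets.length + 2) ["ICN"] remain []).reverse

-- ===== PORT B =====
-- dfs of Source B: the inner while loop is the recursion on the same node with the updated graph;
-- dests.pop(0) is Dict.insert of the tail.  Fuel len(tickets)+1 is never exhausted on inputs
-- satisfying Pre_solution (proved below).
def dfsB : Nat → String → PySem.Dict String (List String) →
    PySem.Dict String (List String) × List String
  | 0, _, g => (g, [])
  | f + 1, node, g =>
    match g.getD node [] with
    | [] => (g, [node])
    | d :: ds =>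
      let r1 := dfsB f d (g.insert node ds)
      let r2 := dfsB f node r1.1
      (r2.1, r1.2 ++ r2.2)

-- result[::-1] is List.reverse (PySem.List.slice?_none_none_neg_one).
def solution_alt (tickets : List (List String)) : List String :=
  let graph0 : PySem.Dict String (List String) :=
    tickets.foldl (fun dct tk =>
      -- 's, d = tk[0], tk[1]': Python raises ValueError on a non-pair ticket (excluded by Pre_solution)
      if tk.length = 2 then dct.modify (tk.getD 0 "") [] (fun b => b ++ [tk.getD 1 ""])
      else dct)
      PySem.Dict.empty
  let graph :=
    graph0.keys.foldl
      (fun dct s => dct.modify s [] (fun b => PySem.List.sorted b (fun x => x) false)) graph0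
  (dfsB (tickets.length + 1) "ICN" graph).2.reverse

-- ===== PRECONDITION & SPEC =====
-- Pre_ excludes exactly the tickets that are not 2-element lists: 'for s, d in tickets'
-- raises ValueError on those, in A and in B alike.
def Pre_solution (tickets : List (List String)) : Prop := ∀ tk ∈ tickets, tk.length = 2
instance (tickets : List (List String)) : Decidable (Pre_solution tickets) := by unfold Pre_solution; infer_instance
def pvWitness_solution : List (List String) := [["ICN", "AAA"], ["AAA", "ICN"]]

def Spec_solution (tickets : List (List String)) (out : List String) : Prop := out = solution_alt tickets
instance (tickets : List (List String)) (out : List String) : Decidable (Spec_solution tickets out) := by unfold Spec_solution; infer_instance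

-- ===== CLAIM (what is proved, stated in full; the proofs are below) =====
def Claim_equal_solution : Prop := ∀ (tickets : List (List String)), Dom_solution tickets → Pre_solution tickets → Spec_solution tickets (solution tickets)


-- ===== LEMMAS AND PROOFS =====

-- total number of remaining destinations stored in a graph (proof-only measure)
def pvE (g : PySem.Dict String (List String)) : Nat := (g.items.map (fun p => p.2.length)).sum

-- destinations of the tickets departing from k, in ticket order (proof-only)
def destsOf (k : String) (ts : List (List String)) : List String :=
  (ts.filter (fun tk => tk.getD 0 "" == k)).map (fun tk => tk.getD 1 "")

lemma pv_length_insertBy (p : String → String → Bool) (x : String) (l : List String) :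
    (PySem.List.insertBy p x l).length = l.length + 1 := by
  induction l with
  | nil => rfl
  | cons y ys ih =>
    rw [PySem.List.insertBy]
    split <;> simp [ih]

lemma pv_sum_replace (v : String) (w u : List String) :
    ∀ (L : List (String × List String)), (L.map Prod.fst).Nodup → (v, w) ∈ L →
    ((L.map (fun p => if (p.1 == v) = true then (v, u) else p)).map (fun p => p.2.length)).sum
        + w.length
      = (L.map (fun p => p.2.length)).sum + u.length := by
  intro L
  induction L with
  | nil => simp
  | cons p t ih =>
    intro hn hm
    simp only [List.map_cons, List.nodup_cons, List.mem_map] at hn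
    rcases List.mem_cons.mp hm with h | h
    · subst h
      have ht : List.map (fun p => if (p.1 == v) = true then (v, u) else p) t = List.map id t :=
        List.map_congr_left (fun a ha => by
          have hne : a.1 ≠ v := fun he => hn.1 ⟨a, ha, he⟩
          simp [hne])
      simp only [List.map_cons, ht, List.map_id, List.sum_cons]
      simp
      omega
    · have hp : p.1 ≠ v := fun he => hn.1 ⟨(v, w), h, he.symm⟩
      have hif : (p.1 == v) = false := by simp [hp]
      simp only [List.map_cons, hif, Bool.false_eq_true, if_false, List.sum_cons]
      have := ih hn.2 h
      omega

lemma pv_get?_of_getD_cons (g : PySem.Dict String (List String)) (k : String) {d : String}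
    {ds : List String} (h : g.getD k [] = d :: ds) : g.get? k = some (d :: ds) := by
  cases hg : g.get? k with
  | none => rw [PySem.Dict.getD, hg] at h; simp at h
  | some w => rw [PySem.Dict.getD, hg] at h; simp at h; simp [h]

lemma pvE_insert_not_contains (g : PySem.Dict String (List String)) (k : String)
    (v : List String) (h : g.contains k = false) :
    pvE (g.insert k v) = pvE g + v.length := by
  simp [pvE, PySem.Dict.insert, h]

lemma pvE_insert_of_get? (g : PySem.Dict String (List String)) (k : String) {w : List String}
    (v : List String) (hn : g.keys.Nodup) (h : g.get? k = some w) :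
    pvE (g.insert k v) + w.length = pvE g + v.length := by
  have hc : g.contains k = true := by rw [PySem.Dict.contains_eq_isSome_get?, h]; rfl
  rw [pvE, pvE, PySem.Dict.items_insert_of_contains _ _ hc]
  exact pv_sum_replace k w v g.items hn (PySem.Dict.mem_items_of_get?_eq_some _ h)

lemma pv_bucket_le_E (g : PySem.Dict String (List String)) (k : String) {w : List String}
    (h : g.get? k = some w) : w.length ≤ pvE g :=
  List.le_sum_of_mem (List.mem_map_of_mem (PySem.Dict.mem_items_of_get?_eq_some _ h))

lemma pvE_pop (g : PySem.Dict String (List String)) (k : String) {d : String} {ds : List String}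
    (hn : g.keys.Nodup) (h : g.getD k [] = d :: ds) :
    pvE (g.insert k ds) + 1 = pvE g ∧ (g.insert k ds).keys.Nodup ∧ 1 ≤ pvE g := by
  have hq := pv_get?_of_getD_cons g k h
  have h2 := pvE_insert_of_get? g k ds hn hq
  have h3 := pv_bucket_le_E g k hq
  simp at h2 h3
  exact ⟨by omega, PySem.Dict.nodup_keys_insert _ _ _ hn, by omega⟩

lemma pv_nodup_keys_modify (g : PySem.Dict String (List String)) (k : String)
    (d0 : List String) (f : List String → List String) (hn : g.keys.Nodup) :
    (g.modify k d0 f).keys.Nodup := by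
  rw [PySem.Dict.modify]
  exact PySem.Dict.nodup_keys_insert _ _ _ hn

lemma pvE_modify (g : PySem.Dict String (List String)) (k : String)
    (u : List String → List String) (hn : g.keys.Nodup) :
    pvE (g.modify k [] u) + (g.getD k []).length = pvE g + (u (g.getD k [])).length := by
  rw [PySem.Dict.modify]
  cases hc : g.contains k with
  | false =>
    have hg : g.get? k = none := by
      rw [PySem.Dict.contains_eq_isSome_get?] at hc
      exact Option.not_isSome_iff_eq_none.mp (by simp [hc])
    have hd : g.getD k [] = [] := by rw [PySem.Dict.getD, hg]; rfl
    rw [hd, pvE_insert_not_contains g k _ hc]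
    simp
  | true =>
    have hg : ∃ w, g.get? k = some w := by
      rw [PySem.Dict.contains_eq_isSome_get?] at hc
      exact Option.isSome_iff_exists.mp hc
    obtain ⟨w, hw⟩ := hg
    have hd : g.getD k [] = w := by rw [PySem.Dict.getD, hw]; rfl
    rw [hd]
    exact pvE_insert_of_get? g k _ hn hw

-- the shared build loop: the per-key bucket is the fold of the ticket destinations of that key
lemma pv_build_fold (u : String → List String → List String)
    (hu : ∀ x b, (u x b).length ≤ b.length + 1)
    (step : PySem.Dict String (List String) → List String → PySem.Dict String (List String))
    (hstep : ∀ d s dd, step d [s, dd] = d.modify s [] (u dd)) :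
    ∀ (ts : List (List String)) (g : PySem.Dict String (List String)),
      (∀ tk ∈ ts, tk.length = 2) → g.keys.Nodup →
      (∀ k, (ts.foldl step g).getD k []
          = (destsOf k ts).foldl (fun acc x => u x acc) (g.getD k []))
      ∧ (ts.foldl step g).keys.Nodup ∧ pvE (ts.foldl step g) ≤ pvE g + ts.length := by
  intro ts
  induction ts with
  | nil => intro g _ hn; exact ⟨fun k => by simp [destsOf], hn, by simp⟩
  | cons tk rest ih =>
    intro g h2 hn
    obtain ⟨s, dd, rfl⟩ : ∃ s dd, tk = [s, dd] := by
      have hl := h2 tk (by simp)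
      match tk, hl with
      | [s, dd], _ => exact ⟨s, dd, rfl⟩
    rw [List.foldl_cons, hstep]
    have hn' := pv_nodup_keys_modify g s [] (u dd) hn
    obtain ⟨ihg, ihn, ihE⟩ := ih (g.modify s [] (u dd)) (fun tk h => h2 tk (List.mem_cons_of_mem _ h)) hn'
    refine ⟨?_, ihn, ?_⟩
    · intro k
      rw [ihg k]
      by_cases hk : s = k
      · subst hk
        have : destsOf s ([s, dd] :: rest) = dd :: destsOf s rest := by
          simp [destsOf]
        rw [this, List.foldl_cons, PySem.Dict.getD_modify_self]
      · have : destsOf k ([s, dd] :: rest) = destsOf k rest := by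
          simp [destsOf, hk]
        rw [this, PySem.Dict.getD_modify_of_ne]
        exact fun he => hk he.symm
    · have h1 := pvE_modify g s (u dd) hn
      have h3 := hu dd (g.getD s [])
      simp only [List.length_cons]
      omega

-- the key-sorting loop of B: every bucket of a key in ks gets sorted, others are untouched
lemma pv_sort_fold :
    ∀ (ks : List String) (g : PySem.Dict String (List String)), g.keys.Nodup →
      (∀ k, (ks.foldl (fun dct s => dct.modify s [] (fun b => PySem.List.sorted b (fun x => x) false)) g).getD k []
          = if k ∈ ks then PySem.List.sorted (g.getD k []) (fun x => x) false else g.getD k [])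
      ∧ (ks.foldl (fun dct s => dct.modify s [] (fun b => PySem.List.sorted b (fun x => x) false)) g).keys.Nodup
      ∧ pvE (ks.foldl (fun dct s => dct.modify s [] (fun b => PySem.List.sorted b (fun x => x) false)) g) = pvE g := by
  intro ks
  induction ks with
  | nil => intro g hn; exact ⟨fun k => by simp, hn, rfl⟩
  | cons s rest ih =>
    intro g hn
    rw [List.foldl_cons]
    have hn' := pv_nodup_keys_modify g s [] (fun b => PySem.List.sorted b (fun x => x) false) hn
    obtain ⟨ihg, ihn, ihE⟩ := ih (g.modify s [] (fun b => PySem.List.sorted b (fun x => x) false)) hn'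
    refine ⟨?_, ihn, ?_⟩
    · intro k
      rw [ihg k]
      by_cases hk : k = s
      · subst hk
        rw [PySem.Dict.getD_modify_self]
        by_cases hm : k ∈ rest <;> simp [hm, PySem.List.sorted_sorted]
      · rw [PySem.Dict.getD_modify_of_ne _ _ _ hk]
        by_cases hm : k ∈ rest <;> simp [hm, hk]
    · rw [ihE]
      have h1 := pvE_modify g s (fun b => PySem.List.sorted b (fun x => x) false) hn
      rw [PySem.List.length_sorted] at h1
      omega


-- ----- unfolding lemmas for the two machines -----

lemma loopA_nil (f : Nat) (g : PySem.Dict String (List String)) (ans : List String) :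
    loopA f [] g ans = ans := by cases f <;> rfl

lemma loopA_cons_nil {g : PySem.Dict String (List String)} {start : String}
    (f : Nat) (rest ans : List String) (h : g.getD start [] = []) :
    loopA (f + 1) (start :: rest) g ans = loopA f rest g (ans ++ [start]) := by
  rw [loopA]
  simp [h]

lemma loopA_cons_cons {g : PySem.Dict String (List String)} {start d : String}
    {ds : List String} (f : Nat) (rest ans : List String) (h : g.getD start [] = d :: ds) :
    loopA (f + 1) (start :: rest) g ans = loopA f (d :: start :: rest) (g.insert start ds) ans := by
  rw [loopA]
  simp [h]

lemma dfsB_nil_bucket {g : PySem.Dict String (List String)} {node : String}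
    (f : Nat) (h : g.getD node [] = []) : dfsB (f + 1) node g = (g, [node]) := by
  rw [dfsB, h]

lemma dfsB_cons_bucket {g : PySem.Dict String (List String)} {node d : String}
    {ds : List String} (f : Nat) (h : g.getD node [] = d :: ds) :
    dfsB (f + 1) node g
      = ((dfsB f node (dfsB f d (g.insert node ds)).1).1,
         (dfsB f d (g.insert node ds)).2 ++ (dfsB f node (dfsB f d (g.insert node ds)).1).2) := by
  rw [dfsB, h]

-- dfsB keeps the key list duplicate-free and never adds destinations
lemma dfsB_preserves : ∀ (f : Nat) (v : String) (g : PySem.Dict String (List String)),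
    g.keys.Nodup → (dfsB f v g).1.keys.Nodup ∧ pvE (dfsB f v g).1 ≤ pvE g := by
  intro f
  induction f with
  | zero => intro v g hn; exact ⟨hn, le_refl _⟩
  | succ f ih =>
    intro v g hn
    cases hb : g.getD v [] with
    | nil => rw [dfsB_nil_bucket f hb]; exact ⟨hn, le_refl _⟩
    | cons d ds =>
      rw [dfsB_cons_bucket f hb]
      obtain ⟨hE1, hn1, -⟩ := pvE_pop g v hn hb
      obtain ⟨hn2, hE2⟩ := ih d (g.insert v ds) hn1
      obtain ⟨hn3, hE3⟩ := ih v (dfsB f d (g.insert v ds)).1 hn2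
      dsimp only
      exact ⟨hn3, by omega⟩

-- A's loop only reads buckets through getD, so it only depends on the buckets
lemma loopA_congr : ∀ (f : Nat) (st : List String) (g g' : PySem.Dict String (List String))
    (ans : List String), (∀ k, g.getD k [] = g'.getD k []) →
    loopA f st g ans = loopA f st g' ans := by
  intro f
  induction f with
  | zero => intros; rfl
  | succ f ih =>
    intro st g g' ans hR
    cases st with
    | nil => rfl
    | cons start rest =>
      cases hb : g.getD start [] with
      | nil =>
        rw [loopA_cons_nil f rest ans hb, loopA_cons_nil f rest ans ((hR start).symm.trans hb)]
        exact ih rest g g' (ans ++ [start]) hR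
      | cons d ds =>
        rw [loopA_cons_cons f rest ans hb, loopA_cons_cons f rest ans ((hR start).symm.trans hb)]
        apply ih
        intro k
        rw [PySem.Dict.getD_insert, PySem.Dict.getD_insert]
        split
        · rfl
        · exact hR k

-- the heart of the equivalence: A's explicit stack simulates B's recursion.
-- Processing the stack top v consumes 2*(edges burnt by dfs from v) + 1 loop iterations and
-- appends exactly dfs's output to the answer.
lemma pv_main : ∀ (n : Nat) (g : PySem.Dict String (List String)) (v : String)
    (st acc : List String) (fa f : Nat),
    pvE g ≤ n → g.keys.Nodup → pvE g < f →
    loopA (fa + 2 * (pvE g - pvE (dfsB f v g).1) + 1) (v :: st) g acc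
      = loopA fa st (dfsB f v g).1 (acc ++ (dfsB f v g).2) := by
  intro n
  induction n with
  | zero =>
    intro g v st acc fa f hE hn hf
    obtain ⟨f', rfl⟩ : ∃ f', f = f' + 1 := ⟨f - 1, by omega⟩
    have hb : g.getD v [] = [] := by
      cases hb : g.getD v [] with
      | nil => rfl
      | cons d ds =>
        have := pv_bucket_le_E g v (pv_get?_of_getD_cons g v hb)
        simp at this
        omega
    rw [dfsB_nil_bucket f' hb]
    simp only [Nat.sub_self, Nat.mul_zero, Nat.add_zero]
    exact loopA_cons_nil fa st acc hb
  | succ n ih =>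
    intro g v st acc fa f hE hn hf
    obtain ⟨f', rfl⟩ : ∃ f', f = f' + 1 := ⟨f - 1, by omega⟩
    cases hb : g.getD v [] with
    | nil =>
      rw [dfsB_nil_bucket f' hb]
      simp only [Nat.sub_self, Nat.mul_zero, Nat.add_zero]
      exact loopA_cons_nil fa st acc hb
    | cons d ds =>
      obtain ⟨hpop, hn1, hge1⟩ := pvE_pop g v hn hb
      obtain ⟨hn2, hE2⟩ := dfsB_preserves f' d (g.insert v ds) hn1
      obtain ⟨hn3, hE3⟩ := dfsB_preserves f' v (dfsB f' d (g.insert v ds)).1 hn2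
      rw [dfsB_cons_bucket f' hb]
      have harith : fa + 2 * (pvE g - pvE (dfsB f' v (dfsB f' d (g.insert v ds)).1).1) + 1
          = ((fa + 2 * (pvE (dfsB f' d (g.insert v ds)).1
                - pvE (dfsB f' v (dfsB f' d (g.insert v ds)).1).1) + 1)
             + 2 * (pvE (g.insert v ds) - pvE (dfsB f' d (g.insert v ds)).1) + 1) + 1 := by
        omega
      rw [harith, loopA_cons_cons _ _ _ hb,
          ih (g.insert v ds) d (v :: st) acc _ f' (by omega) hn1 (by omega),
          ih (dfsB f' d (g.insert v ds)).1 v st (acc ++ (dfsB f' d (g.insert v ds)).2) fa f'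
            (by omega) hn2 (by omega),
          List.append_assoc]

-- ===== VERDICT (by name: the statement is the Claim_ definition above) =====
lemma pvE_empty : pvE (PySem.Dict.empty : PySem.Dict String (List String)) = 0 := rfl

theorem solution_spec : Claim_equal_solution := by
  intro tickets hdom hpre
  unfold Spec_solution
  obtain ⟨hAg, hAn, hAE⟩ := pv_build_fold
      (fun dd b => PySem.List.insertBy (fun a b => decide (a < b)) dd b)
      (fun x b => le_of_eq (pv_length_insertBy _ x b))
      (fun dct tk =>
        if tk.length = 2 then
          dct.modify (tk.getD 0 "") []
            (fun b => PySem.List.insertBy (fun a b => decide (a < b)) (tk.getD 1 "") b)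
        else dct)
      (fun d s dd => rfl)
      tickets PySem.Dict.empty hpre PySem.Dict.nodup_keys_empty
  obtain ⟨hB0g, hB0n, hB0E⟩ := pv_build_fold
      (fun dd b => b ++ [dd])
      (fun x b => by simp)
      (fun dct tk =>
        if tk.length = 2 then dct.modify (tk.getD 0 "") [] (fun b => b ++ [tk.getD 1 ""])
        else dct)
      (fun d s dd => rfl)
      tickets PySem.Dict.empty hpre PySem.Dict.nodup_keys_empty
  set gA := tickets.foldl (fun dct tk =>
        if tk.length = 2 then
          dct.modify (tk.getD 0 "") []
            (fun b => PySem.List.insertBy (fun a b => decide (a < b)) (tk.getD 1 "") b)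
        else dct) PySem.Dict.empty with hgA
  set gB0 := tickets.foldl (fun dct tk =>
        if tk.length = 2 then dct.modify (tk.getD 0 "") [] (fun b => b ++ [tk.getD 1 ""])
        else dct) PySem.Dict.empty with hgB0
  obtain ⟨hBg, hBn, hBE⟩ := pv_sort_fold gB0.keys gB0 hB0n
  set gB := gB0.keys.foldl
      (fun dct s => dct.modify s [] (fun b => PySem.List.sorted b (fun x => x) false)) gB0 with hgB
  have hbuck : ∀ k, gA.getD k [] = gB.getD k [] := by
    intro k
    have h1 : gA.getD k [] = PySem.List.sorted (destsOf k tickets) (fun x => x) false := by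
      rw [hAg k, PySem.Dict.getD_empty]
      exact (PySem.List.sorted_eq_foldl_insertBy (destsOf k tickets) (fun x => x)).symm
    have h2 : gB.getD k [] = PySem.List.sorted (destsOf k tickets) (fun x => x) false := by
      rw [hBg k]
      by_cases hk : k ∈ gB0.keys
      · rw [if_pos hk, hB0g k, PySem.Dict.getD_empty]
        simp only [PySem.List.foldl_append_singleton, List.nil_append]
      · have hc : gB0.contains k = false := by
          cases hcb : gB0.contains k
          · rfl
          · exact absurd ((PySem.Dict.contains_iff_mem_keys gB0 k).mp hcb) hk
        have hd : gB0.getD k [] = [] := PySem.Dict.getD_of_not_contains _ _ hc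
        have hdst : destsOf k tickets = [] := by
          have h3 := hB0g k
          rw [hd, PySem.Dict.getD_empty] at h3
          simp only [PySem.List.foldl_append_singleton, List.nil_append] at h3
          exact h3.symm
        rw [if_neg hk, hd, hdst]
        rfl
    rw [h1, h2]
  have hEA : pvE gA ≤ tickets.length := by rw [pvE_empty] at hAE; omega
  have hEB : pvE gB ≤ tickets.length := by rw [hBE]; rw [pvE_empty] at hB0E; omega
  show (loopA (2 * tickets.length + 2) ["ICN"] gA []).reverse
      = (dfsB (tickets.length + 1) "ICN" gB).2.reverse
  rw [loopA_congr _ _ gA gB _ hbuck]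
  obtain ⟨-, hdE⟩ := dfsB_preserves (tickets.length + 1) "ICN" gB hBn
  have harith : 2 * tickets.length + 2
      = (2 * (tickets.length - (pvE gB - pvE (dfsB (tickets.length + 1) "ICN" gB).1)) + 1)
        + 2 * (pvE gB - pvE (dfsB (tickets.length + 1) "ICN" gB).1) + 1 := by
    omega
  rw [harith,
      pv_main tickets.length gB "ICN" [] []
        (2 * (tickets.length - (pvE gB - pvE (dfsB (tickets.length + 1) "ICN" gB).1)) + 1)
        (tickets.length + 1) hEB hBn (by omega),
      loopA_nil, List.nil_append]
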